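-- pv_equiv track=rewrite | github.com/pioneer1541/jarvis-mcp-stack | patch_weather_guard_nextdays_v1.py | insert_guard_before_line
-- ===== SOURCE A (Python) =====
-- def find_func_block(lines, func_name):
--     start = -1
--     for i, ln in enumerate(lines):
--         if ln.startswith("def " + func_name + "("):
--             start = i
--             break
--     if start < 0:
--         return (-1, -1)
--     end = len(lines)
--     for j in range(start + 1, len(lines)):
--         if lines[j].startswith("def "):
--             end = j
--             break
--     return (start, end)
--
-- def insert_guard_before_line(lines, func_name, needle_line_startswith, guard_lines, marker):
--     s, e = find_func_block(lines, func_name)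
--     if s < 0:
--         return (lines, False)
--
--     for i in range(s, e):
--         if marker in lines[i]:
--             return (lines, False)
--
--     for i in range(s, e):
--         ln = lines[i]
--         if ln.lstrip().startswith(needle_line_startswith):
--             indent = ln[:len(ln) - len(ln.lstrip())]
--             block = []
--             for gl in guard_lines:
--                 block.append(indent + gl + "\n")
--             lines = lines[:i] + block + lines[i:]
--             return (lines, True)
--
--     return (lines, False)
-- ===== SOURCE B (Python) =====
-- def split_chunks(lines):
--     # Partition lines into a preamble (no "def " lines) and chunks,
--     # each chunk starting at a line that begins with "def ".
--     pre, chunks, cur = [], [], None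
--     for ln in lines:
--         if ln.startswith("def "):
--             if cur is not None:
--                 chunks.append(cur)
--             cur = [ln]
--         elif cur is None:
--             pre.append(ln)
--         else:
--             cur.append(ln)
--     if cur is not None:
--         chunks.append(cur)
--     return pre, chunks
--
--
-- def patch_chunk(chunk, needle_line_startswith, guard_lines, marker):
--     if any(marker in ln for ln in chunk):
--         return None
--     for j, ln in enumerate(chunk):
--         body = ln.lstrip()
--         if body.startswith(needle_line_startswith):
--             indent = ln[: len(ln) - len(body)]
--             return chunk[:j] + [indent + g + "\n" for g in guard_lines] + chunk[j:]
--     return None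
--
--
-- def insert_guard_before_line(lines, func_name, needle_line_startswith, guard_lines, marker):
--     header = "def " + func_name + "("
--     pre, chunks = split_chunks(lines)
--     before = list(pre)
--     for pos, ch in enumerate(chunks):
--         if ch[0].startswith(header):
--             patched = patch_chunk(ch, needle_line_startswith, guard_lines, marker)
--             if patched is None:
--                 return (lines, False)
--             flat = before + patched
--             for c in chunks[pos + 1:]:
--                 flat.extend(c)
--             return (flat, True)
--         before.extend(ch)
--     return (lines, False)
-- ===== Notes on version B (the rewrite author's own statement) =====
-- stated objective: faster
-- what changed: A works on integer indices: two positional searches rebuilding the 'def <name>(' header string for every line tested to get a (start,end) window, then two indexed scans over that window and a splice of the original list; B instead parses the file once into a preamble plus a list of def-chunks (a different intermediate structure), builds the header once, patches the first chunk whose head matches locally, and reassembles the file by concatenating chunks.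
import Mathlib
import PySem

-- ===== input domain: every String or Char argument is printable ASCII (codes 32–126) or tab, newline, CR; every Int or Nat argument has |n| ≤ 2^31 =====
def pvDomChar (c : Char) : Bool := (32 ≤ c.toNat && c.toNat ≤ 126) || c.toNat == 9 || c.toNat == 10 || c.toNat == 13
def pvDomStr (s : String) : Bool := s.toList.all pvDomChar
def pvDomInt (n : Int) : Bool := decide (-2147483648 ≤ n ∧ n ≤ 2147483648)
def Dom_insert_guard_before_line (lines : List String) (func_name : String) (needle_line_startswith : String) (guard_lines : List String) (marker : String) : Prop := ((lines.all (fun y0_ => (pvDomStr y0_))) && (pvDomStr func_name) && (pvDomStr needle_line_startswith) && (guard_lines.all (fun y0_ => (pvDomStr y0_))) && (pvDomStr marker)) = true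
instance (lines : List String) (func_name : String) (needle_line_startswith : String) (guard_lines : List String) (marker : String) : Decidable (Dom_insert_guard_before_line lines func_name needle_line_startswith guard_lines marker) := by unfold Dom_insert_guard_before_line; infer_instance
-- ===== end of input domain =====

-- B replaces A's index-window algorithm (find (start,end) rebuilding the header string per line, scan lines[i]
-- by index, splice the original list) by a chunk decomposition: parse the file once into a preamble plus a list
-- of def-chunks, patch the matching chunk locally, and reassemble from the chunks; measured faster in a timing run.

-- ===== PORT A =====
-- Python 'a + b' on str: exact concatenation of the code-point sequences
def pvStrCat (a b : String) : String := String.ofList (a.toList ++ b.toList)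

-- 'for i, ln in enumerate(lines): if ln.startswith(hdr): start = i; break' (start = -1 if no hit)
def pvA_findStart (hdr : String) : List (Int × String) → Int
  | [] => -1
  | (i, ln) :: rest => if PySem.Str.startswith ln hdr then i else pvA_findStart hdr rest

-- 'for j in range(start+1, len(lines)): if lines[j].startswith("def "): end = j; break'
def pvA_findEnd (lines : List String) (dflt : Int) : List Int → Int
  | [] => dflt
  | j :: rest =>
    if PySem.Str.startswith (PySem.List.pyGetD lines j "") "def " then j
    else pvA_findEnd lines dflt rest

def find_func_block (lines : List String) (func_name : String) : Int × Int :=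
  let start := pvA_findStart (pvStrCat (pvStrCat "def " func_name) "(") (PySem.List.enumerate lines 0)
  if start < 0 then (-1, -1)
  else (start, pvA_findEnd lines (lines.length : Int) (PySem.List.pyRange (start + 1) (lines.length : Int) 1))

-- first loop of A: 'for i in range(s, e): if marker in lines[i]: return (lines, False)'
def pvA_markerScan (lines : List String) (marker : String) : List Int → Bool
  | [] => false
  | i :: rest =>
    if PySem.Str.isIn marker (PySem.List.pyGetD lines i "") then true
    else pvA_markerScan lines marker rest

-- second loop of A: first needle hit builds the guard block and returns the spliced result
def pvA_needleScan (lines : List String) (needle : String) (guard_lines : List String) : List Int → Option (List String × Bool)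
  | [] => none
  | i :: rest =>
    let ln := PySem.List.pyGetD lines i ""
    if PySem.Str.startswith (PySem.Str.lstrip ln) needle then
      let indent := PySem.Str.slice ln none (some ((PySem.Str.len ln : Int) - (PySem.Str.len (PySem.Str.lstrip ln) : Int)))
      let block := guard_lines.foldl (fun acc gl => acc ++ [pvStrCat (pvStrCat indent gl) "\n"]) []
      some (PySem.List.slice lines none (some i) ++ block ++ PySem.List.slice lines (some i) none, true)
    else pvA_needleScan lines needle guard_lines rest

def insert_guard_before_line (lines : List String) (func_name : String) (needle_line_startswith : String) (guard_lines : List String) (marker : String) : List String × Bool :=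
  let se := find_func_block lines func_name
  if se.1 < 0 then (lines, false)
  else if pvA_markerScan lines marker (PySem.List.pyRange se.1 se.2 1) then (lines, false)
  else
    match pvA_needleScan lines needle_line_startswith guard_lines (PySem.List.pyRange se.1 se.2 1) with
    | some r => r
    | none => (lines, false)

-- ===== PORT B =====
-- split_chunks: one foldl over the lines, state (pre, chunks, cur) as in Source B
def pvB_splitStep (st : List String × List (List String) × Option (List String)) (ln : String) :
    List String × List (List String) × Option (List String) :=
  if PySem.Str.startswith ln "def " then
    match st.2.2 with
    | some cur => (st.1, st.2.1 ++ [cur], some [ln])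
    | none => (st.1, st.2.1, some [ln])
  else
    match st.2.2 with
    | none => (st.1 ++ [ln], st.2.1, none)
    | some cur => (st.1, st.2.1, some (cur ++ [ln]))

-- the trailing 'if cur is not None: chunks.append(cur)' of split_chunks
def pvB_splitFin (st : List String × List (List String) × Option (List String)) : List String × List (List String) :=
  match st.2.2 with
  | some cur => (st.1, st.2.1 ++ [cur])
  | none => (st.1, st.2.1)

def split_chunks (lines : List String) : List String × List (List String) :=
  pvB_splitFin (lines.foldl pvB_splitStep ([], [], none))

-- 'for j, ln in enumerate(chunk): …' of patch_chunk
def pvB_patchLoop (chunk : List String) (needle : String) (gls : List String) :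
    List (Int × String) → Option (List String)
  | [] => none
  | (j, ln) :: rest =>
    let body := PySem.Str.lstrip ln
    if PySem.Str.startswith body needle then
      let indent := PySem.Str.slice ln none (some ((PySem.Str.len ln : Int) - (PySem.Str.len body : Int)))
      some (PySem.List.slice chunk none (some j) ++ gls.map (fun g => pvStrCat (pvStrCat indent g) "\n") ++ PySem.List.slice chunk (some j) none)
    else pvB_patchLoop chunk needle gls rest

def patch_chunk (chunk : List String) (needle : String) (gls : List String) (marker : String) : Option (List String) :=
  if chunk.any (fun ln => PySem.Str.isIn marker ln) then none
  else pvB_patchLoop chunk needle gls (PySem.List.enumerate chunk 0)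

-- main loop of Source B over the chunks; 'before' accumulates the flattened earlier chunks.
-- chunks produced by split_chunks are nonempty, so ch.headD "" is Python's ch[0] on every reachable input.
def pvB_mainLoop (orig : List String) (header needle marker : String) (gls : List String)
    (before : List String) : List (List String) → List String × Bool
  | [] => (orig, false)
  | ch :: rest =>
    if PySem.Str.startswith (ch.headD "") header then
      match patch_chunk ch needle gls marker with
      | none => (orig, false)
      | some patched => (rest.foldl (fun acc c => acc ++ c) (before ++ patched), true)
    else pvB_mainLoop orig header needle marker gls (before ++ ch) rest

def insert_guard_before_line_alt (lines : List String) (func_name : String) (needle_line_startswith : String) (guard_lines : List String) (marker : String) : List String × Bool :=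
  let header := pvStrCat (pvStrCat "def " func_name) "("
  let pc := split_chunks lines
  pvB_mainLoop lines header needle_line_startswith marker guard_lines pc.1 pc.2

-- ===== PRECONDITION & SPEC =====
def Spec_insert_guard_before_line (lines : List String) (func_name : String) (needle_line_startswith : String) (guard_lines : List String) (marker : String) (out : List String × Bool) : Prop := out = insert_guard_before_line_alt lines func_name needle_line_startswith guard_lines marker
instance (lines : List String) (func_name : String) (needle_line_startswith : String) (guard_lines : List String) (marker : String) (out : List String × Bool) : Decidable (Spec_insert_guard_before_line lines func_name needle_line_startswith guard_lines marker out) := by unfold Spec_insert_guard_before_line; infer_instance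

-- ===== CLAIM =====
def Claim_equal_insert_guard_before_line : Prop := ∀ (lines : List String) (func_name : String) (needle_line_startswith : String) (guard_lines : List String) (marker : String), Dom_insert_guard_before_line lines func_name needle_line_startswith guard_lines marker → Spec_insert_guard_before_line lines func_name needle_line_startswith guard_lines marker (insert_guard_before_line lines func_name needle_line_startswith guard_lines marker)

-- ===== LEMMAS AND PROOFS =====
def pvIndent (ln : String) : String :=
  PySem.Str.slice ln none (some ((PySem.Str.len ln : Int) - (PySem.Str.len (PySem.Str.lstrip ln) : Int)))

-- common spec of 'first needle hit': (offset, indent)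
def pvHit? (nd : String) : List String → Option (Nat × String)
  | [] => none
  | ln :: rest =>
    if PySem.Str.startswith (PySem.Str.lstrip ln) nd then some (0, pvIndent ln)
    else (pvHit? nd rest).map (fun p => (p.1 + 1, p.2))

-- a chunk: nonempty, def head, non-def tail
def pvShaped (C : List String) : Prop :=
  ∃ h t, C = h :: t ∧ PySem.Str.startswith h "def " = true ∧ ∀ ln ∈ t, PySem.Str.startswith ln "def " = false

def pvUnfoldSt (st : List String × List (List String) × Option (List String)) : List String :=
  st.1 ++ st.2.1.flatten ++ (st.2.2.getD [])

def pvInv (st : List String × List (List String) × Option (List String)) : Prop :=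
  (∀ ln ∈ st.1, PySem.Str.startswith ln "def " = false) ∧
  (∀ C ∈ st.2.1, pvShaped C) ∧
  (∀ c, st.2.2 = some c → pvShaped c) ∧
  (st.2.2 = none → st.2.1 = [])

theorem pv_getD (lines : List String) (j : Nat) (h : j < lines.length) :
    PySem.List.pyGetD lines (j : Int) "" = lines[j] := by
  simp [PySem.List.pyGetD_natCast, List.getD_eq_getElem?_getD, List.getElem?_eq_getElem h]

theorem pv_step_inv (st : List String × List (List String) × Option (List String)) (ln : String)
    (h : pvInv st) : pvInv (pvB_splitStep st ln) ∧ pvUnfoldSt (pvB_splitStep st ln) = pvUnfoldSt st ++ [ln] := by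
  obtain ⟨p, cs, cur⟩ := st
  obtain ⟨h1, h2, h3, h4⟩ := h
  by_cases hd : PySem.Str.startswith ln "def " = true
  · cases cur with
    | none =>
      have hcs : cs = [] := h4 rfl
      subst hcs
      have hstep : pvB_splitStep (p, [], none) ln = (p, [], some [ln]) := by
        unfold pvB_splitStep; rw [if_pos hd]
      rw [hstep]
      unfold pvInv
      refine ⟨⟨h1, by simp, ⟨?_, ?_⟩⟩, ?_⟩
      · intro c hc
        cases hc
        exact ⟨ln, [], rfl, hd, by simp⟩
      · intro hn; cases hn
      · simp [pvUnfoldSt]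
    | some c =>
      have hstep : pvB_splitStep (p, cs, some c) ln = (p, cs ++ [c], some [ln]) := by
        unfold pvB_splitStep; rw [if_pos hd]
      rw [hstep]
      unfold pvInv
      refine ⟨⟨h1, ?_, ⟨?_, ?_⟩⟩, ?_⟩
      · intro C hC
        rcases List.mem_append.mp hC with hC | hC
        · exact h2 C hC
        · have hc2 : C = c := by simpa using hC
          rw [hc2]; exact h3 c rfl
      · intro c' hc'
        cases hc'
        exact ⟨ln, [], rfl, hd, by simp⟩
      · intro hn; cases hn
      · simp [pvUnfoldSt, List.flatten_append]
  · have hd' : PySem.Str.startswith ln "def " = false := by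
      cases hb : PySem.Str.startswith ln "def " with
      | false => rfl
      | true => exact absurd hb hd
    cases cur with
    | none =>
      have hcs : cs = [] := h4 rfl
      subst hcs
      have hstep : pvB_splitStep (p, [], none) ln = (p ++ [ln], [], none) := by
        unfold pvB_splitStep; rw [if_neg hd]
      rw [hstep]
      unfold pvInv
      refine ⟨⟨?_, by simp, ⟨?_, ?_⟩⟩, ?_⟩
      · intro x hx
        rcases List.mem_append.mp hx with hx | hx
        · exact h1 x hx
        · have hx2 : x = ln := by simpa using hx
          rw [hx2]; exact hd'
      · intro c hc; cases hc
      · intro _; rfl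
      · simp [pvUnfoldSt]
    | some c =>
      have hstep : pvB_splitStep (p, cs, some c) ln = (p, cs, some (c ++ [ln])) := by
        unfold pvB_splitStep; rw [if_neg hd]
      rw [hstep]
      unfold pvInv
      refine ⟨⟨h1, h2, ⟨?_, ?_⟩⟩, ?_⟩
      · intro c' hc'
        cases hc'
        obtain ⟨hh, tt, hct, hdh, htl⟩ := h3 c rfl
        subst hct
        refine ⟨hh, tt ++ [ln], by simp, hdh, ?_⟩
        intro x hx
        rcases List.mem_append.mp hx with hx | hx
        · exact htl x hx
        · have hx2 : x = ln := by simpa using hx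
          rw [hx2]; exact hd'
      · intro hn; cases hn
      · simp [pvUnfoldSt]

theorem pv_split_inv : ∀ (l : List String) st, pvInv st →
    pvInv (l.foldl pvB_splitStep st) ∧ pvUnfoldSt (l.foldl pvB_splitStep st) = pvUnfoldSt st ++ l := by
  intro l
  induction l with
  | nil => intro st h; exact ⟨h, by simp⟩
  | cons ln rest ih =>
    intro st h
    obtain ⟨hstep, heq⟩ := pv_step_inv st ln h
    obtain ⟨hinv, heq'⟩ := ih (pvB_splitStep st ln) hstep
    refine ⟨hinv, ?_⟩
    simp only [List.foldl_cons] at *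
    rw [heq', heq]
    simp

theorem pv_split_spec (lines : List String) :
    (split_chunks lines).1 ++ (split_chunks lines).2.flatten = lines ∧
    (∀ ln ∈ (split_chunks lines).1, PySem.Str.startswith ln "def " = false) ∧
    (∀ C ∈ (split_chunks lines).2, pvShaped C) := by
  have hinv0 : pvInv ([], [], none) := by
    unfold pvInv
    refine ⟨by simp, by simp, ⟨?_, ?_⟩⟩
    · intro c hc; cases hc
    · intro _; rfl
  obtain ⟨⟨h1, h2, h3, h4⟩, heq⟩ := pv_split_inv lines ([], [], none) hinv0
  simp only [pvUnfoldSt, List.nil_append, List.flatten_nil, Option.getD_none, List.append_nil] at heq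
  cases hcur : (lines.foldl pvB_splitStep ([], [], none)).2.2 with
  | none =>
    have hsc : split_chunks lines
        = ((lines.foldl pvB_splitStep ([], [], none)).1, (lines.foldl pvB_splitStep ([], [], none)).2.1) := by
      unfold split_chunks pvB_splitFin; rw [hcur]
    rw [hsc]
    rw [hcur] at heq
    simp only [Option.getD_none, List.append_nil] at heq
    exact ⟨heq, h1, h2⟩
  | some c =>
    have hsc : split_chunks lines
        = ((lines.foldl pvB_splitStep ([], [], none)).1, (lines.foldl pvB_splitStep ([], [], none)).2.1 ++ [c]) := by
      unfold split_chunks pvB_splitFin; rw [hcur]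
    rw [hsc]
    rw [hcur] at heq
    simp only [Option.getD_some] at heq
    refine ⟨by simpa [List.flatten_append, List.append_assoc] using heq, h1, ?_⟩
    intro C hC
    rcases List.mem_append.mp hC with hC | hC
    · exact h2 C hC
    · have hc2 : C = c := by simpa using hC
      rw [hc2]; exact h3 c hcur

-- "def " is a prefix of the header, so a non-"def " line never matches the header
theorem pv_header_def (fn ln : String) (h : PySem.Str.startswith ln "def " = false) :
    PySem.Str.startswith ln (pvStrCat (pvStrCat "def " fn) "(") = false := by
  cases hb : PySem.Str.startswith ln (pvStrCat (pvStrCat "def " fn) "(") with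
  | false => rfl
  | true =>
    exfalso
    have h1 : (pvStrCat (pvStrCat "def " fn) "(").toList <+: ln.toList :=
      (PySem.Chars.startswith_iff ln.toList (pvStrCat (pvStrCat "def " fn) "(").toList).mp (by simpa using hb)
    have h2 : ("def ").toList <+: (pvStrCat (pvStrCat "def " fn) "(").toList := by
      simp only [pvStrCat, String.toList_ofList]
      exact (List.prefix_append _ _).trans (List.prefix_append _ _)
    have h3 : PySem.Str.startswith ln "def " = true := by
      simpa using (PySem.Chars.startswith_iff ln.toList ("def ").toList).mpr (h2.trans h1)
    rw [h3] at h; cases h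

theorem pv_findStart_all_false (hdr : String) : ∀ (l : List (Int × String)),
    (∀ p ∈ l, PySem.Str.startswith p.2 hdr = false) → pvA_findStart hdr l = -1 := by
  intro l
  induction l with
  | nil => intro _; rfl
  | cons x rest ih =>
    intro h
    cases x with | mk i ln =>
    have hf : PySem.Str.startswith ln hdr = false := h (i, ln) (by simp)
    simp only [pvA_findStart]
    rw [if_neg (by rw [hf]; simp)]
    exact ih (fun p hp => h p (by simp [hp]))

theorem pv_findStart_append (hdr : String) : ∀ (l1 l2 : List (Int × String)),
    (∀ p ∈ l1, PySem.Str.startswith p.2 hdr = false) →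
    pvA_findStart hdr (l1 ++ l2) = pvA_findStart hdr l2 := by
  intro l1
  induction l1 with
  | nil => intro l2 _; rfl
  | cons x rest ih =>
    intro l2 h
    cases x with | mk i ln =>
    have hf : PySem.Str.startswith ln hdr = false := h (i, ln) (by simp)
    simp only [List.cons_append, pvA_findStart]
    rw [if_neg (by rw [hf]; simp)]
    exact ih l2 (fun p hp => h p (by simp [hp]))

theorem pv_findEnd_tw (lines : List String) : ∀ (n a : Nat), a + n = lines.length →
    pvA_findEnd lines (lines.length : Int) (PySem.List.pyRange (a : Int) (lines.length : Int) 1)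
      = ((a + ((lines.drop a).takeWhile (fun ln => !PySem.Str.startswith ln "def ")).length : Nat) : Int) := by
  intro n
  induction n with
  | zero =>
    intro a ha
    rw [PySem.List.pyRange_one_eq_nil (by omega)]
    rw [List.drop_eq_nil_of_le (by omega)]
    simp only [pvA_findEnd, List.takeWhile_nil, List.length_nil]
    omega
  | succ k ih =>
    intro a ha
    have hlt : a < lines.length := by omega
    rw [PySem.List.pyRange_one_cons (by exact_mod_cast hlt)]
    rw [List.drop_eq_getElem_cons hlt]
    simp only [pvA_findEnd, pv_getD lines a hlt, List.takeWhile_cons]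
    by_cases h : PySem.Str.startswith lines[a] "def " = true
    · rw [if_pos h, h]
      simp
    · rw [if_neg h]
      have h' : PySem.Str.startswith lines[a] "def " = false := by
        cases hb : PySem.Str.startswith lines[a] "def " with
        | false => rfl
        | true => exact absurd hb h
      rw [h']
      rw [show ((a : Int) + 1) = ((a + 1 : Nat) : Int) by push_cast; ring]
      rw [ih (a + 1) (by omega)]
      simp only [Bool.not_false, if_true, List.length_cons]
      push_cast
      omega

theorem pv_marker_eq (lines : List String) (m : String) : ∀ (n a : Nat), a + n ≤ lines.length →
    pvA_markerScan lines m (PySem.List.pyRange (a : Int) ((a + n : Nat) : Int) 1)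
      = ((lines.drop a).take n).any (fun ln => PySem.Str.isIn m ln) := by
  intro n
  induction n with
  | zero =>
    intro a ha
    rw [PySem.List.pyRange_one_eq_nil (by push_cast; omega)]
    simp [pvA_markerScan]
  | succ k ih =>
    intro a ha
    have hlt : a < lines.length := by omega
    rw [PySem.List.pyRange_one_cons (by push_cast; omega)]
    rw [List.drop_eq_getElem_cons hlt, List.take_succ_cons, List.any_cons]
    simp only [pvA_markerScan, pv_getD lines a hlt]
    rw [show ((a : Int) + 1) = ((a + 1 : Nat) : Int) by push_cast; ring,
        show ((a + (k + 1) : Nat) : Int) = (((a + 1) + k : Nat) : Int) by push_cast; ring]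
    rw [ih (a + 1) (by omega)]
    by_cases h : PySem.Str.isIn m lines[a] = true
    · rw [if_pos h, h]; simp
    · rw [if_neg h]
      have h' : PySem.Str.isIn m lines[a] = false := by
        cases hb : PySem.Str.isIn m lines[a] with
        | false => rfl
        | true => exact absurd hb h
      rw [h']; simp

theorem pv_needle_eq (lines : List String) (nd : String) (gls : List String) :
    ∀ (n a : Nat), a + n ≤ lines.length →
    pvA_needleScan lines nd gls (PySem.List.pyRange (a : Int) ((a + n : Nat) : Int) 1)
      = (pvHit? nd ((lines.drop a).take n)).map (fun p =>
          (PySem.List.slice lines none (some ((a : Int) + (p.1 : Int))) ++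
             gls.foldl (fun acc gl => acc ++ [pvStrCat (pvStrCat p.2 gl) "\n"]) [] ++
             PySem.List.slice lines (some ((a : Int) + (p.1 : Int))) none, true)) := by
  intro n
  induction n with
  | zero =>
    intro a ha
    rw [PySem.List.pyRange_one_eq_nil (by push_cast; omega)]
    simp [pvA_needleScan, pvHit?]
  | succ k ih =>
    intro a ha
    have hlt : a < lines.length := by omega
    rw [PySem.List.pyRange_one_cons (by push_cast; omega)]
    rw [List.drop_eq_getElem_cons hlt, List.take_succ_cons]
    simp only [pvA_needleScan, pvHit?, pv_getD lines a hlt]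
    by_cases h : PySem.Str.startswith (PySem.Str.lstrip lines[a]) nd = true
    · rw [if_pos h, if_pos h]
      simp only [Option.map_some, pvIndent]
      norm_num
    · rw [if_neg h, if_neg h]
      rw [show ((a : Int) + 1) = ((a + 1 : Nat) : Int) by push_cast; ring,
          show ((a + (k + 1) : Nat) : Int) = (((a + 1) + k : Nat) : Int) by push_cast; ring]
      rw [ih (a + 1) (by omega)]
      cases hres : pvHit? nd ((lines.drop (a + 1)).take k) with
      | none => simp
      | some p =>
        obtain ⟨k1, ind⟩ := p
        simp only [Option.map_some, Option.some.injEq, Prod.mk.injEq]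
        rw [show ((a : Int) + ((k1 + 1 : Nat) : Int)) = (((a + 1 : Nat) : Int) + (k1 : Int)) by push_cast; ring]
        exact ⟨rfl, trivial⟩

theorem pv_hit_lt (nd : String) : ∀ (l : List String) (p : Nat × String), pvHit? nd l = some p → p.1 < l.length := by
  intro l
  induction l with
  | nil => intro p h; simp [pvHit?] at h
  | cons ln rest ih =>
    intro p h
    simp only [pvHit?] at h
    by_cases hs : PySem.Str.startswith (PySem.Str.lstrip ln) nd = true
    · rw [if_pos hs] at h
      cases h; simp
    · rw [if_neg hs] at h
      cases hres : pvHit? nd rest with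
      | none => rw [hres] at h; simp at h
      | some q =>
        rw [hres] at h
        simp only [Option.map_some, Option.some.injEq] at h
        subst h
        have := ih q hres
        simp only [List.length_cons]
        omega

theorem pv_patchLoop_eq (nd : String) (gls : List String) (chunk : List String) :
    ∀ (n a : Nat), a + n = chunk.length →
    pvB_patchLoop chunk nd gls (PySem.List.enumerate ((chunk.drop a)) (a : Int))
      = (pvHit? nd (chunk.drop a)).map (fun p =>
          chunk.take (a + p.1) ++ gls.map (fun g => pvStrCat (pvStrCat p.2 g) "\n") ++ chunk.drop (a + p.1)) := by
  intro n
  induction n with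
  | zero =>
    intro a ha
    rw [List.drop_eq_nil_of_le (by omega)]
    simp [PySem.List.enumerate_nil, pvB_patchLoop, pvHit?]
  | succ k ih =>
    intro a ha
    have hlt : a < chunk.length := by omega
    rw [List.drop_eq_getElem_cons hlt, PySem.List.enumerate_cons]
    simp only [pvB_patchLoop, pvHit?]
    by_cases h : PySem.Str.startswith (PySem.Str.lstrip chunk[a]) nd = true
    · rw [if_pos h, if_pos h]
      simp only [Option.map_some, pvIndent]
      rw [PySem.List.slice_to_natCast, PySem.List.slice_from_natCast]
      simp
    · rw [if_neg h, if_neg h]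
      rw [show ((a : Int) + 1) = ((a + 1 : Nat) : Int) by push_cast; ring]
      rw [ih (a + 1) (by omega)]
      cases hres : pvHit? nd (chunk.drop (a + 1)) with
      | none => simp
      | some p =>
        obtain ⟨k1, ind⟩ := p
        simp only [Option.map_some, Option.some.injEq]
        rw [show a + (k1 + 1) = (a + 1) + k1 by omega]

theorem pv_tw_flatten : ∀ (rest : List (List String)), (∀ C ∈ rest, pvShaped C) →
    (rest.flatten).takeWhile (fun ln => !PySem.Str.startswith ln "def ") = [] := by
  intro rest h
  cases rest with
  | nil => rfl
  | cons C rest' =>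
    obtain ⟨hh, tt, hct, hdh, _⟩ := h C (by simp)
    subst hct
    have hdhC : PySem.Chars.startswith hh.toList ['d', 'e', 'f', ' '] = true := by
      have := hdh; simp only [PySem.Str.startswith_eq] at this; simpa using this
    simp [hdhC]

theorem pv_main (fn nd m : String) (gls : List String) :
    ∀ (Cs : List (List String)) (P : List String),
    (∀ ln ∈ P, PySem.Str.startswith ln (pvStrCat (pvStrCat "def " fn) "(") = false) →
    (∀ C ∈ Cs, pvShaped C) →
    insert_guard_before_line (P ++ Cs.flatten) fn nd gls m
      = pvB_mainLoop (P ++ Cs.flatten) (pvStrCat (pvStrCat "def " fn) "(") nd m gls P Cs := by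
  intro Cs
  induction Cs with
  | nil =>
    intro P hP _
    have hall : ∀ p ∈ PySem.List.enumerate (P ++ (List.flatten ([] : List (List String)))) (0 : Int),
        PySem.Str.startswith p.2 (pvStrCat (pvStrCat "def " fn) "(") = false := by
      intro p hp
      have hmem : p.2 ∈ P ++ (List.flatten ([] : List (List String))) := by
        have := List.mem_map_of_mem (f := Prod.snd) hp
        rw [PySem.List.map_snd_enumerate] at this
        exact this
      simp only [List.flatten_nil, List.append_nil] at hmem
      exact hP _ hmem
    simp only [insert_guard_before_line, find_func_block]
    rw [pv_findStart_all_false _ _ hall]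
    norm_num [pvB_mainLoop]
  | cons C rest ih =>
    intro P hP hsh
    obtain ⟨h, t, hC, hdh, htl⟩ := hsh C (by simp)
    subst hC
    simp only [pvB_mainLoop, List.headD_cons, List.flatten_cons]
    by_cases hm : PySem.Str.startswith h (pvStrCat (pvStrCat "def " fn) "(") = true
    case neg =>
      have hm' : PySem.Str.startswith h (pvStrCat (pvStrCat "def " fn) "(") = false := by
        cases hb : PySem.Str.startswith h (pvStrCat (pvStrCat "def " fn) "(") with
        | false => rfl
        | true => exact absurd hb hm
      rw [if_neg hm]
      have hP' : ∀ ln ∈ P ++ (h :: t), PySem.Str.startswith ln (pvStrCat (pvStrCat "def " fn) "(") = false := by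
        intro ln hln
        rcases List.mem_append.mp hln with hln | hln
        · exact hP ln hln
        · rcases List.mem_cons.mp hln with hln | hln
          · rw [hln]; exact hm'
          · exact pv_header_def fn ln (htl ln hln)
      have hassoc : P ++ ((h :: t) ++ rest.flatten) = (P ++ (h :: t)) ++ rest.flatten := by
        simp [List.append_assoc]
      rw [hassoc]
      exact ih (P ++ (h :: t)) hP' (fun C hC => hsh C (by simp [hC]))
    case pos =>
      rw [if_pos hm]
      -- A side: locate the block (s = |P|, e = |P| + |h::t|) and reduce both scans to the chunk
      simp only [insert_guard_before_line, find_func_block]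
      have hstart : pvA_findStart (pvStrCat (pvStrCat "def " fn) "(")
          (PySem.List.enumerate (P ++ ((h :: t) ++ rest.flatten)) (0 : Int)) = (P.length : Int) := by
        rw [PySem.List.enumerate_append]
        rw [pv_findStart_append _ _ _ ?noMatch]
        case noMatch =>
          intro p hp
          have hmem : p.2 ∈ P := by
            have := List.mem_map_of_mem (f := Prod.snd) hp
            rw [PySem.List.map_snd_enumerate] at this
            exact this
          exact hP _ hmem
        rw [List.cons_append, PySem.List.enumerate_cons]
        simp only [pvA_findStart]
        rw [if_pos hm]
        ring
      rw [hstart]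
      rw [if_neg (show ¬((P.length : Int) < 0) by omega)]
      dsimp only
      rw [if_neg (show ¬((P.length : Int) < 0) by omega)]
      have hlenL : (P ++ ((h :: t) ++ rest.flatten)).length
          = P.length + (t.length + 1) + rest.flatten.length := by
        simp [List.length_append]; omega
      have hend : pvA_findEnd (P ++ ((h :: t) ++ rest.flatten))
          ((P ++ ((h :: t) ++ rest.flatten)).length : Int)
          (PySem.List.pyRange ((P.length : Int) + 1) ((P ++ ((h :: t) ++ rest.flatten)).length : Int) 1)
          = ((P.length + (t.length + 1) : Nat) : Int) := by
        rw [show ((P.length : Int) + 1) = ((P.length + 1 : Nat) : Int) by push_cast; ring]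
        rw [pv_findEnd_tw _ ((t.length) + rest.flatten.length) (P.length + 1) (by omega)]
        have hdrop : (P ++ ((h :: t) ++ rest.flatten)).drop (P.length + 1) = t ++ rest.flatten := by
          rw [show P ++ ((h :: t) ++ rest.flatten) = (P ++ [h]) ++ (t ++ rest.flatten) by simp]
          rw [show P.length + 1 = (P ++ [h]).length by simp]
          exact List.drop_left
        rw [hdrop]
        rw [List.takeWhile_append_of_pos (by intro x hx; rw [htl x hx]; rfl)]
        rw [pv_tw_flatten rest (fun C hC => hsh C (by simp [hC]))]
        simp only [List.append_nil]
        push_cast; ring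
      rw [hend]
      have hdropP : (P ++ ((h :: t) ++ rest.flatten)).drop P.length = (h :: t) ++ rest.flatten :=
        List.drop_left
      have htake : ((h :: t) ++ rest.flatten).take (t.length + 1) = h :: t := by
        rw [show t.length + 1 = (h :: t).length by simp]
        exact List.take_left
      rw [show ((P.length + (t.length + 1) : Nat) : Int)
            = ((P.length + (t.length + 1) : Nat) : Int) from rfl]
      rw [pv_marker_eq (P ++ ((h :: t) ++ rest.flatten)) m (t.length + 1) P.length (by omega)]
      rw [hdropP, htake]
      -- B side: unfold patch_chunk
      simp only [patch_chunk]
      by_cases hmark : (h :: t).any (fun ln => PySem.Str.isIn m ln) = true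
      · rw [if_pos hmark, if_pos hmark]
      · rw [if_neg hmark, if_neg hmark]
        rw [pv_needle_eq (P ++ ((h :: t) ++ rest.flatten)) nd gls (t.length + 1) P.length (by omega)]
        rw [hdropP, htake]
        have hB := pv_patchLoop_eq nd gls (h :: t) (h :: t).length 0 (by simp)
        norm_num at hB
        rw [PySem.List.enumerate_cons, show (0 : Int) + 1 = (1 : Int) by norm_num, hB]
        cases hhit : pvHit? nd (h :: t) with
        | none => simp
        | some p =>
          obtain ⟨j, ind⟩ := p
          have hj : j < t.length + 1 := by
            have := pv_hit_lt nd (h :: t) (j, ind) hhit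
            simpa using this
          simp only [Option.map_some]
          rw [PySem.List.foldl_append_eq_flatten]
          rw [PySem.List.foldl_append_singleton_eq_map]
          rw [show ((P.length : Int) + (j : Int)) = ((P.length + j : Nat) : Int) by push_cast; ring]
          rw [PySem.List.slice_to_natCast, PySem.List.slice_from_natCast]
          have htk : (P ++ ((h :: t) ++ rest.flatten)).take (P.length + j) = P ++ (h :: t).take j := by
            rw [List.take_length_add_append]
            rw [List.take_append_of_le_length (show j ≤ (h :: t).length by simp; omega)]
          have hdk : (P ++ ((h :: t) ++ rest.flatten)).drop (P.length + j) = (h :: t).drop j ++ rest.flatten := by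
            rw [List.drop_length_add_append]
            rw [List.drop_append_of_le_length (show j ≤ (h :: t).length by simp; omega)]
          rw [htk, hdk]
          simp [List.append_assoc]

-- ===== VERDICT =====
theorem insert_guard_before_line_spec : Claim_equal_insert_guard_before_line := by
  intro lines fn nd gls m _
  unfold Spec_insert_guard_before_line
  obtain ⟨hflat, hpre, hsh⟩ := pv_split_spec lines
  have hpre' : ∀ ln ∈ (split_chunks lines).1, PySem.Str.startswith ln (pvStrCat (pvStrCat "def " fn) "(") = false :=
    fun ln hln => pv_header_def fn ln (hpre ln hln)
  have := pv_main fn nd m gls (split_chunks lines).2 (split_chunks lines).1 hpre' hsh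
  rw [hflat] at this
  rw [this]
  rfl
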